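-- pv_equiv track=rewrite | github.com/VladislavBulanov/Python_Basic_2 | Module19/07_pizza/main.py | detail_orders_information
-- ===== SOURCE A (Python) =====
-- def detail_orders_information(list_of_orders):
--     detailed_data = dict()
--
--     for item in list_of_orders:
--         # Если человек ещё не делал заказ:
--         if item[0] not in detailed_data:
--             detailed_data[item[0]] = {item[1]: int(item[2])}
--         # Если человек уже делал заказ,
--         # но пицца была другая:
--         elif item[1] not in detailed_data[item[0]]:
--             detailed_data[item[0]][item[1]] = int(item[2])
--         # Если человек уже заказывал данную пиццу:
--         else:
--             detailed_data[item[0]][item[1]] += int(item[2])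
--
--     return detailed_data
-- ===== SOURCE B (Python) =====
-- def detail_orders_information(list_of_orders):
--     # Pass 1: flat table keyed by (person, pizza), summing quantities.
--     flat = {}
--     for item in list_of_orders:
--         key = (item[0], item[1])
--         flat[key] = flat.get(key, 0) + int(item[2])
--     # Pass 2: reshape the flat table into the nested dict.
--     detailed_data = {}
--     for (person, pizza), quantity in flat.items():
--         detailed_data.setdefault(person, {})[pizza] = quantity
--     return detailed_data
-- ===== Notes on version B (the rewrite author's own statement) =====
-- stated objective: alternative
-- what changed: A fills the nested dict in one loop with three branches (new person / new pizza / accumulate); B first builds a flat table keyed by (person, pizza) summing quantities, then reshapes it into the nested dict in a second pass with setdefault.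
import Mathlib
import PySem

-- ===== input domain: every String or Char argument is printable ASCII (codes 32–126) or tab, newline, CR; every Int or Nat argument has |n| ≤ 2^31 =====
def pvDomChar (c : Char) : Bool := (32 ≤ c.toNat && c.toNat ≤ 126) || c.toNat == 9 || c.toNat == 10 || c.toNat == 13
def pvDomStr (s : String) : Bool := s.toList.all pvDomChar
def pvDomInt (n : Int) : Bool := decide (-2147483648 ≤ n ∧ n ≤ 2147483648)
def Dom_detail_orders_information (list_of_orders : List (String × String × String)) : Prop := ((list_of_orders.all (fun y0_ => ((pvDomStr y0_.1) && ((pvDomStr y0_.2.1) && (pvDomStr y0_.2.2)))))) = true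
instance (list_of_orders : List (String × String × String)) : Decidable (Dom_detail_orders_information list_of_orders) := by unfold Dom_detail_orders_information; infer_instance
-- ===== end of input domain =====

-- B replaces A's single three-branch loop over a nested dict by a flat (person, pizza) sum table
-- built in one pass plus a second reshape pass (return values proved equal; no speed claim).

-- int(item[2]); ofStr? = none is Python's ValueError, excluded by Pre_detail_orders_information
def pvQty (s : String) : Int := (PySem.Int.ofStr? s).getD 0

-- ===== PORT A =====
def detail_orders_information (list_of_orders : List (String × String × String)) : List (String × List (String × Int)) :=
  ((list_of_orders.foldl (fun detailed_data item =>
      if ¬ detailed_data.contains item.1 then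
        detailed_data.insert item.1 (PySem.Dict.ofList [(item.2.1, pvQty item.2.2)])
      else if ¬ (detailed_data.getD item.1 PySem.Dict.empty).contains item.2.1 then
        detailed_data.insert item.1
          ((detailed_data.getD item.1 PySem.Dict.empty).insert item.2.1 (pvQty item.2.2))
      else
        detailed_data.insert item.1
          ((detailed_data.getD item.1 PySem.Dict.empty).modify item.2.1 0 (· + pvQty item.2.2)))
    (PySem.Dict.empty : PySem.Dict String (PySem.Dict String Int))).items.map
    (fun p => (p.1, p.2.items)))

-- ===== PORT B =====
def detail_orders_information_alt (list_of_orders : List (String × String × String)) : List (String × List (String × Int)) :=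
  let flat : PySem.Dict (String × String) Int :=
    list_of_orders.foldl (fun flat item =>
      flat.insert (item.1, item.2.1) (flat.getD (item.1, item.2.1) 0 + pvQty item.2.2))
      PySem.Dict.empty
  let detailed_data : PySem.Dict String (PySem.Dict String Int) :=
    flat.items.foldl (fun r e =>
      let r := r.setdefault e.1.1 PySem.Dict.empty
      r.insert e.1.1 ((r.getD e.1.1 PySem.Dict.empty).insert e.1.2 e.2))
      PySem.Dict.empty
  detailed_data.items.map (fun p => (p.1, p.2.items))

-- ===== PRECONDITION & SPEC =====
-- Pre_ admits exactly the inputs on which every quantity string parses as a Python int;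
-- on the excluded inputs A (and B alike) raise ValueError in int().
def Pre_detail_orders_information (list_of_orders : List (String × String × String)) : Prop :=
  (list_of_orders.all (fun it => (PySem.Int.ofStr? it.2.2).isSome)) = true
instance (list_of_orders : List (String × String × String)) : Decidable (Pre_detail_orders_information list_of_orders) := by unfold Pre_detail_orders_information; infer_instance

def pvWitness_detail_orders_information : (List (String × String × String)) :=
  [("Ann", "margherita", "2")]

def Spec_detail_orders_information (list_of_orders : List (String × String × String)) (out : List (String × List (String × Int))) : Prop := out = detail_orders_information_alt list_of_orders
instance (list_of_orders : List (String × String × String)) (out : List (String × List (String × Int))) : Decidable (Spec_detail_orders_information list_of_orders out) := by unfold Spec_detail_orders_information; infer_instance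

-- ===== CLAIM (what is proved, stated in full; the proofs are below) =====
def Claim_equal_detail_orders_information : Prop := ∀ (list_of_orders : List (String × String × String)), Dom_detail_orders_information list_of_orders → Pre_detail_orders_information list_of_orders → Spec_detail_orders_information list_of_orders (detail_orders_information list_of_orders)

-- ===== LEMMAS AND PROOFS =====

theorem getD_groupfold {α κ ν : Type} [BEq κ] [LawfulBEq κ] [DecidableEq κ]
    (l : List α) (key : α → κ) (dflt : ν) (h : ν → α → ν)
    (d : PySem.Dict κ ν) (p : κ) :
    (l.foldl (fun d x => d.insert (key x) (h (d.getD (key x) dflt) x)) d).getD p dflt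
      = (l.filter (fun x => key x = p)).foldl h (d.getD p dflt) := by
  induction l generalizing d with
  | nil => rfl
  | cons x xs ih =>
    simp only [List.foldl_cons, ih, PySem.Dict.getD_insert, List.filter_cons]
    by_cases hx : key x = p
    · simp [hx]
    · rw [if_neg (fun h' => hx h'.symm)]; simp [hx]

theorem items_sumfold {α κ : Type} [BEq κ] [LawfulBEq κ] [DecidableEq κ]
    (l : List α) (key : α → κ) (w : α → Int) :
    (l.foldl (fun d x => d.insert (key x) (d.getD (key x) 0 + w x))
        (PySem.Dict.empty : PySem.Dict κ Int)).items
      = (PySem.Set.ofList (l.map key)).map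
          (fun k => (k, (l.filter (fun x => key x = k)).foldl (fun a x => a + w x) 0)) := by
  have hnd : (l.foldl (fun d x => d.insert (key x) (d.getD (key x) 0 + w x))
      (PySem.Dict.empty : PySem.Dict κ Int)).keys.Nodup :=
    PySem.Dict.nodup_keys_foldl_insert_key l key _ _ (by simp)
  rw [PySem.Dict.items_eq_map_keys _ hnd 0, PySem.Dict.keys_foldl_insert_key]
  simp only [PySem.Dict.keys_empty, PySem.Set.update_nil_left]
  apply List.map_congr_left
  intro k hk
  rw [getD_groupfold l key 0 (fun a x => a + w x)]
  simp

theorem ofList_map_ofList {α β : Type} [BEq α] [LawfulBEq α] [DecidableEq α] [BEq β] [LawfulBEq β] [DecidableEq β]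
    (xs : List α) (f : α → β) :
    PySem.Set.ofList ((PySem.Set.ofList xs).map f) = PySem.Set.ofList (xs.map f) := by
  induction xs using List.reverseRecOn with
  | nil => rfl
  | append_singleton xs x ih =>
    rw [PySem.Set.ofList_append_singleton, PySem.Set.add_eq_ite]
    by_cases hx : x ∈ PySem.Set.ofList xs
    · rw [if_pos hx, ih]
      simp only [List.map_append, List.map_singleton, PySem.Set.ofList_append_singleton]
      rw [PySem.Set.add_of_mem]
      exact (PySem.Set.mem_ofList _ _).mpr (List.mem_map_of_mem ((PySem.Set.mem_ofList _ _).mp hx))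
    · rw [if_neg hx]
      simp only [List.map_append, List.map_singleton, PySem.Set.ofList_append_singleton]
      rw [ih]

theorem filter_ofList {α : Type} [BEq α] [LawfulBEq α] [DecidableEq α] (xs : List α) (q : α → Bool) :
    (PySem.Set.ofList xs).filter q = PySem.Set.ofList (xs.filter q) := by
  induction xs using List.reverseRecOn with
  | nil => rfl
  | append_singleton xs x ih =>
    rw [PySem.Set.ofList_append_singleton, PySem.Set.add_eq_ite]
    by_cases hx : x ∈ PySem.Set.ofList xs
    · rw [if_pos hx, ih, List.filter_append, List.filter_singleton]
      by_cases hq : q x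
      · simp only [hq, cond_true]
        rw [PySem.Set.ofList_append_singleton, PySem.Set.add_of_mem]
        exact (PySem.Set.mem_ofList _ _).mpr
          (List.mem_filter.mpr ⟨(PySem.Set.mem_ofList _ _).mp hx, hq⟩)
      · simp [hq]
    · rw [if_neg hx, List.filter_append, List.filter_singleton, List.filter_append,
        List.filter_singleton, ih]
      by_cases hq : q x
      · simp only [hq, cond_true]
        rw [PySem.Set.ofList_append_singleton, PySem.Set.add_of_not_mem]
        intro hm
        exact hx ((PySem.Set.mem_ofList _ _).mpr (List.mem_filter.mp ((PySem.Set.mem_ofList _ _).mp hm)).1)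
      · simp [hq]

theorem ofList_map_injective {α β : Type} [BEq α] [LawfulBEq α] [DecidableEq α] [BEq β] [LawfulBEq β] [DecidableEq β]
    (xs : List α) (f : α → β) (hf : Function.Injective f) :
    PySem.Set.ofList (xs.map f) = (PySem.Set.ofList xs).map f := by
  induction xs using List.reverseRecOn with
  | nil => rfl
  | append_singleton xs x ih =>
    simp only [List.map_append, List.map_singleton, PySem.Set.ofList_append_singleton,
      PySem.Set.add_eq_ite, ih]
    by_cases hx : x ∈ PySem.Set.ofList xs
    · rw [if_pos hx, if_pos (List.mem_map_of_mem hx)]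
    · rw [if_neg hx, if_neg (by
        intro hm
        obtain ⟨y, hy, hyx⟩ := List.mem_map.mp hm
        exact hx (hf hyx ▸ hy)), List.map_append, List.map_singleton]

theorem reshape_step (r : PySem.Dict String (PySem.Dict String Int)) (e : (String × String) × Int) :
    (let r' := r.setdefault e.1.1 PySem.Dict.empty
     r'.insert e.1.1 ((r'.getD e.1.1 PySem.Dict.empty).insert e.1.2 e.2))
    = r.insert e.1.1 ((r.getD e.1.1 PySem.Dict.empty).insert e.1.2 e.2) := by
  by_cases hc : r.contains e.1.1
  · simp only [PySem.Dict.setdefault_of_contains (h := hc)]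
  · simp only [PySem.Dict.setdefault_of_not_contains (h := by simpa using hc),
      PySem.Dict.getD_insert_self, PySem.Dict.insert_insert_self,
      PySem.Dict.getD_of_not_contains (h := by simpa using hc)]

theorem nodup_inner (L : List ((String × String) × Int)) (hnd : (L.map (·.1)).Nodup) (p : String) :
    ((L.filter (fun e => e.1.1 = p)).map (fun e => e.1.2)).Nodup := by
  have h1 : ((L.filter (fun e => e.1.1 = p)).map (·.1)).Nodup :=
    hnd.sublist (List.Sublist.map _ List.filter_sublist)
  have h2 : ∀ m ∈ (L.filter (fun e => e.1.1 = p)).map (·.1), m.1 = p := by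
    intro m hm
    obtain ⟨e, he, rfl⟩ := List.mem_map.mp hm
    exact of_decide_eq_true (List.mem_filter.mp he).2
  have : ((L.filter (fun e => e.1.1 = p)).map (·.1)).map Prod.snd
      = (L.filter (fun e => e.1.1 = p)).map (fun e => e.1.2) := by
    rw [List.map_map]; rfl
  rw [← this]
  exact h1.map_on (fun x hx y hy hxy =>
    Prod.ext (by rw [h2 x hx, h2 y hy]) hxy)

theorem reshape_items (L : List ((String × String) × Int)) (hnd : (L.map (·.1)).Nodup) :
    ((L.foldl (fun r e =>
        let r := r.setdefault e.1.1 PySem.Dict.empty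
        r.insert e.1.1 ((r.getD e.1.1 PySem.Dict.empty).insert e.1.2 e.2))
      (PySem.Dict.empty : PySem.Dict String (PySem.Dict String Int))).items.map
      (fun p => (p.1, p.2.items)))
    = (PySem.Set.ofList (L.map (·.1.1))).map
        (fun p => (p, (L.filter (fun e => e.1.1 = p)).map (fun e => (e.1.2, e.2)))) := by
  have hstep : (fun (r : PySem.Dict String (PySem.Dict String Int)) (e : (String × String) × Int) =>
      let r := r.setdefault e.1.1 PySem.Dict.empty
      r.insert e.1.1 ((r.getD e.1.1 PySem.Dict.empty).insert e.1.2 e.2))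
      = fun r e => r.insert e.1.1 ((r.getD e.1.1 PySem.Dict.empty).insert e.1.2 e.2) :=
    funext fun r => funext fun e => reshape_step r e
  rw [hstep]
  have hnd' := PySem.Dict.nodup_keys_foldl_insert_key L (fun e => e.1.1)
    (fun r e => (r.getD e.1.1 PySem.Dict.empty).insert e.1.2 e.2)
    (PySem.Dict.empty : PySem.Dict String (PySem.Dict String Int)) (by simp)
  rw [PySem.Dict.items_eq_map_keys _ hnd' PySem.Dict.empty,
    PySem.Dict.keys_foldl_insert_key, List.map_map]
  simp only [PySem.Dict.keys_empty, PySem.Set.update_nil_left]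
  apply List.map_congr_left
  intro p hp
  simp only [Function.comp]
  rw [getD_groupfold L (fun e => e.1.1) PySem.Dict.empty (fun inn e => inn.insert e.1.2 e.2),
    PySem.Dict.getD_empty]
  congr 1
  rw [PySem.Dict.items_foldl_insert_fresh (L.filter (fun e => e.1.1 = p))
    (fun e => e.1.2) (fun e => e.2) PySem.Dict.empty
    (by intro a _; exact PySem.Dict.contains_empty _) (nodup_inner L hnd p)]
  simp [PySem.Dict.empty]

theorem portA_step (d : PySem.Dict String (PySem.Dict String Int)) (item : String × String × String) :
    (if ¬ d.contains item.1 then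
        d.insert item.1 (PySem.Dict.ofList [(item.2.1, pvQty item.2.2)])
      else if ¬ (d.getD item.1 PySem.Dict.empty).contains item.2.1 then
        d.insert item.1 ((d.getD item.1 PySem.Dict.empty).insert item.2.1 (pvQty item.2.2))
      else
        d.insert item.1 ((d.getD item.1 PySem.Dict.empty).modify item.2.1 0 (· + pvQty item.2.2)))
    = d.insert item.1 ((d.getD item.1 PySem.Dict.empty).insert item.2.1
        ((d.getD item.1 PySem.Dict.empty).getD item.2.1 0 + pvQty item.2.2)) := by
  by_cases h1 : d.contains item.1
  · by_cases h2 : (d.getD item.1 PySem.Dict.empty).contains item.2.1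
    · simp [h1, h2]; rfl
    · simp [h1, h2, PySem.Dict.getD_of_not_contains (h := by simpa using h2)]
  · simp [h1, PySem.Dict.getD_of_not_contains (h := by simpa using h1), PySem.Dict.getD_empty]
    rfl

theorem portB_flat (orders : List (String × String × String)) :
    (orders.foldl (fun flat item =>
      flat.insert (item.1, item.2.1) (flat.getD (item.1, item.2.1) 0 + pvQty item.2.2))
      (PySem.Dict.empty : PySem.Dict (String × String) Int)).items
    = (PySem.Set.ofList (orders.map (fun it => (it.1, it.2.1)))).map
        (fun k => (k, (orders.filter (fun x => (x.1, x.2.1) = k)).foldl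
          (fun a x => a + pvQty x.2.2) 0)) := by
  exact items_sumfold orders (fun it => (it.1, it.2.1)) (fun it => pvQty it.2.2)

theorem portA_closed (orders : List (String × String × String)) :
    detail_orders_information orders
    = (PySem.Set.ofList (orders.map (·.1))).map
        (fun p => (p,
          (PySem.Set.ofList ((orders.filter (fun it => it.1 = p)).map (·.2.1))).map
            (fun z => (z,
              ((orders.filter (fun it => it.1 = p)).filter (fun it => it.2.1 = z)).foldl
                (fun a it => a + pvQty it.2.2) 0)))) := by
  unfold detail_orders_information
  simp only [portA_step]
  have hnd' := PySem.Dict.nodup_keys_foldl_insert_key orders (fun it => it.1)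
    (fun d it => (d.getD it.1 PySem.Dict.empty).insert it.2.1
      ((d.getD it.1 PySem.Dict.empty).getD it.2.1 0 + pvQty it.2.2))
    (PySem.Dict.empty : PySem.Dict String (PySem.Dict String Int)) (by simp)
  rw [PySem.Dict.items_eq_map_keys _ hnd' PySem.Dict.empty,
    PySem.Dict.keys_foldl_insert_key, List.map_map]
  simp only [PySem.Dict.keys_empty, PySem.Set.update_nil_left]
  apply List.map_congr_left
  intro p hp
  simp only [Function.comp]
  rw [getD_groupfold orders (fun it => it.1) PySem.Dict.empty
    (fun inn it => inn.insert it.2.1 (inn.getD it.2.1 0 + pvQty it.2.2)),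
    PySem.Dict.getD_empty]
  congr 1
  exact items_sumfold (orders.filter (fun it => it.1 = p)) (fun it => it.2.1)
    (fun it => pvQty it.2.2)

set_option maxHeartbeats 1000000 in
theorem portB_closed (orders : List (String × String × String)) :
    detail_orders_information_alt orders
    = (PySem.Set.ofList (orders.map (·.1))).map
        (fun p => (p,
          (PySem.Set.ofList ((orders.filter (fun it => it.1 = p)).map (·.2.1))).map
            (fun z => (z,
              ((orders.filter (fun it => it.1 = p)).filter (fun it => it.2.1 = z)).foldl
                (fun a it => a + pvQty it.2.2) 0)))) := by
  unfold detail_orders_information_alt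
  dsimp only
  rw [portB_flat orders]
  rw [reshape_items _ (by
    rw [List.map_map]
    show (List.map (fun k => k) _).Nodup
    rw [List.map_id']
    exact PySem.Set.nodup_ofList _)]
  -- outer keys
  have houter : PySem.Set.ofList
      (List.map (fun e => e.1.1)
        ((PySem.Set.ofList (orders.map (fun it => (it.1, it.2.1)))).map
          (fun k => (k, (orders.filter (fun x => (x.1, x.2.1) = k)).foldl
            (fun a x => a + pvQty x.2.2) 0))))
      = PySem.Set.ofList (orders.map (fun it => it.1)) := by
    rw [List.map_map, show ((fun (e : (String × String) × Int) => e.1.1) ∘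
        (fun k => (k, (orders.filter (fun x => (x.1, x.2.1) = k)).foldl
          (fun a x => a + pvQty x.2.2) 0))) = fun k => k.1 from rfl,
      ofList_map_ofList, List.map_map]
    rfl
  rw [houter]
  apply List.map_congr_left
  intro p hp
  congr 1
  -- inner list for one person p
  rw [List.filter_map, filter_ofList, List.filter_map]
  rw [show (((fun (e : (String × String) × Int) => decide (e.1.1 = p)) ∘
      (fun k => (k, (orders.filter (fun x => (x.1, x.2.1) = k)).foldl
        (fun a x => a + pvQty x.2.2) 0))) ∘ (fun it : String × String × String => (it.1, it.2.1)))
      = (fun it : String × String × String => decide (it.1 = p)) from rfl]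
  rw [List.map_congr_left (l := orders.filter (fun it => it.1 = p))
    (g := (fun z : String => (p, z)) ∘ (fun it : String × String × String => it.2.1))
    (fun x hx => by
      have hx1 : x.1 = p := of_decide_eq_true (List.mem_filter.mp hx).2
      show (x.1, x.2.1) = (p, x.2.1)
      rw [hx1])]
  rw [← List.map_map, ofList_map_injective _ _ (fun a b h => congrArg Prod.snd h)]
  rw [List.map_map, List.map_map]
  apply List.map_congr_left
  intro z hz
  show (z, (orders.filter (fun x => (x.1, x.2.1) = (p, z))).foldl (fun a x => a + pvQty x.2.2) 0) = _
  rw [List.filter_filter]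
  have hfc : List.filter (fun x : String × String × String =>
        decide ((x.1, x.2.1) = (p, z))) orders
      = List.filter (fun a : String × String × String =>
        decide (a.2.1 = z) && decide (a.1 = p)) orders :=
    List.filter_congr (fun x _ => by simp only [Prod.mk.injEq, Bool.decide_and]; exact Bool.and_comm _ _)
  congr 1
  rw [hfc]

-- ===== VERDICT (by name: the statement is the Claim_ definition above) =====
theorem detail_orders_information_spec : Claim_equal_detail_orders_information := by
  intro list_of_orders _ _
  unfold Spec_detail_orders_information
  rw [portA_closed, portB_closed]
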